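-- pv_equiv track=rewrite | github.com/SeanwithFAITH/python-ical-timetable | timetable_cuc.py | oeWeek
-- ===== SOURCE A (Python) =====
-- def oeWeek(startWeek, endWeek, mode):
-- 	allWeek = range(startWeek, endWeek + 1)
-- 	oddWeek = []; evenWeek = []
-- 	for w in allWeek:
-- 		if w % 2 == 0: evenWeek.append(w)
-- 		else: oddWeek.append(w)
-- 	if mode: return oddWeek
-- 	else: return evenWeek
-- ===== SOURCE B (Python) =====
-- def oeWeek(startWeek, endWeek, mode):
--     target = 1 if mode else 0
--     first = startWeek if startWeek % 2 == target else startWeek + 1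
--     return list(range(first, endWeek + 1, 2))
-- ===== Notes on version B (the rewrite author's own statement) =====
-- stated objective: simpler
-- what changed: B strides directly over the wanted parity with a step-2 range starting at the first aligned week, instead of scanning every week and partitioning into two lists.
import Mathlib
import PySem

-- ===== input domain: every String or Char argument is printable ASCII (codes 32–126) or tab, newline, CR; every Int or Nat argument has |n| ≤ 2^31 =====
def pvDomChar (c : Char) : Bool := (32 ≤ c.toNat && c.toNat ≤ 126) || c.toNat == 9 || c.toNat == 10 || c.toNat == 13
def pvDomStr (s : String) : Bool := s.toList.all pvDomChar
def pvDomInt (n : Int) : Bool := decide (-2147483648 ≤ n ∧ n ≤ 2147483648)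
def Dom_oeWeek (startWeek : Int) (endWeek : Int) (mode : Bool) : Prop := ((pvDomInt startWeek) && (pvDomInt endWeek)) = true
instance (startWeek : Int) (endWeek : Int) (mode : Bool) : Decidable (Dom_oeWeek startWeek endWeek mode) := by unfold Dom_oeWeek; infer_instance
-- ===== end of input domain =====

-- B replaces A's full scan-and-partition of the week range by a single step-2 range
-- starting at the first week of the wanted parity (objective: simpler).


-- ===== PORT A =====
def oeWeek (startWeek : Int) (endWeek : Int) (mode : Bool) : List Int :=
  let allWeek := PySem.List.pyRange startWeek (endWeek + 1) 1
  let p := allWeek.foldl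
    (fun (acc : List Int × List Int) w =>
      if PySem.Int.mod w 2 = 0 then (acc.1, acc.2 ++ [w]) else (acc.1 ++ [w], acc.2))
    ([], [])
  if mode then p.1 else p.2

-- ===== PORT B =====
def oeWeek_alt (startWeek : Int) (endWeek : Int) (mode : Bool) : List Int :=
  let target : Int := if mode then 1 else 0
  let first : Int := if PySem.Int.mod startWeek 2 = target then startWeek else startWeek + 1
  PySem.List.pyRange first (endWeek + 1) 2

-- ===== PRECONDITION & SPEC =====
def Spec_oeWeek (startWeek : Int) (endWeek : Int) (mode : Bool) (out : List Int) : Prop := out = oeWeek_alt startWeek endWeek mode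
instance (startWeek : Int) (endWeek : Int) (mode : Bool) (out : List Int) : Decidable (Spec_oeWeek startWeek endWeek mode out) := by unfold Spec_oeWeek; infer_instance

-- ===== CLAIM (what is proved, stated in full; the proofs are below) =====
def Claim_equal_oeWeek : Prop := ∀ (startWeek : Int) (endWeek : Int) (mode : Bool), Dom_oeWeek startWeek endWeek mode → Spec_oeWeek startWeek endWeek mode (oeWeek startWeek endWeek mode)

-- ===== LEMMAS AND PROOFS =====

theorem pymod_two (a : Int) : PySem.Int.mod a 2 = a % 2 := by
  simp [PySem.Int.mod, Int.fmod_eq_emod]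

theorem pyRange_two_nil {a b : Int} (h : b ≤ a) : PySem.List.pyRange a b 2 = [] := by
  rw [PySem.List.pyRange_of_pos a b (by norm_num)]
  simp [show ¬ a < b by omega]

theorem pyRange_two_cons {a b : Int} (h : a < b) :
    PySem.List.pyRange a b 2 = a :: PySem.List.pyRange (a + 2) b 2 := by
  rw [PySem.List.pyRange_of_pos a b (by norm_num),
      PySem.List.pyRange_of_pos (a + 2) b (by norm_num)]
  have hn : (if a < b then ((b - a + 2 - 1) / 2).toNat else 0)
      = (if a + 2 < b then ((b - (a + 2) + 2 - 1) / 2).toNat else 0) + 1 := by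
    split_ifs <;> omega
  rw [hn, List.range_succ_eq_map]
  simp only [List.map_cons, List.map_map, Function.comp_def]
  congr 1
  · push_cast; ring
  · exact List.map_congr_left fun k _ => by push_cast; ring

-- A's partition loop appends the P-filtered / ¬P-filtered elements to the two accumulators.
theorem fold_spec (P : Int → Prop) [DecidablePred P] (l : List Int) (o e : List Int) :
    l.foldl (fun (acc : List Int × List Int) w =>
        if P w then (acc.1, acc.2 ++ [w]) else (acc.1 ++ [w], acc.2)) (o, e)
      = (o ++ l.filter (fun w => !decide (P w)), e ++ l.filter (fun w => decide (P w))) := by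
  induction l generalizing o e with
  | nil => simp
  | cons x xs ih =>
    by_cases hx : P x <;> simp [hx, ih]

-- The stride-2 range starting at the first parity-aligned week equals the parity filter.
theorem stride_eq (n : Nat) (b t : Int) (ht : t = 0 ∨ t = 1) :
    ∀ a : Int, (b - a).toNat = n →
    PySem.List.pyRange (if a % 2 = t then a else a + 1) b 2
      = (PySem.List.pyRange a b 1).filter (fun w => decide (w % 2 = t)) := by
  induction n with
  | zero =>
    intro a hn
    have hba : b ≤ a := by omega
    rw [PySem.List.pyRange_one_eq_nil hba]
    split_ifs <;> [exact pyRange_two_nil hba; exact pyRange_two_nil (by omega)]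
  | succ n ih =>
    intro a hn
    have hab : a < b := by omega
    rw [PySem.List.pyRange_one_cons hab, List.filter_cons]
    have ihs := ih (a + 1) (by omega)
    have hflip : (a + 1) % 2 = t ↔ ¬ a % 2 = t := by
      constructor <;> intro h <;> rcases ht with rfl | rfl <;> omega
    by_cases ha : a % 2 = t
    · rw [if_pos ha, pyRange_two_cons hab, if_pos (by simpa using ha)]
      rw [if_neg ((not_iff_not.mpr hflip).mpr (not_not_intro ha)), show a + 1 + 1 = a + 2 by ring] at ihs
      rw [ihs]
    · rw [if_neg ha, if_neg (by simpa using ha)]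
      rw [if_pos (hflip.mpr ha)] at ihs
      exact ihs

-- ===== VERDICT (by name: the statement is the Claim_ definition above) =====
theorem oeWeek_spec : Claim_equal_oeWeek := by
  intro s e m _
  unfold Spec_oeWeek oeWeek oeWeek_alt
  dsimp only
  rw [fold_spec (fun w => PySem.Int.mod w 2 = 0)]
  simp only [pymod_two]
  cases m with
  | false =>
    simp only [Bool.false_eq_true, if_false, List.nil_append]
    exact (stride_eq ((e + 1) - s).toNat (e + 1) 0 (Or.inl rfl) s rfl).symm
  | true =>
    simp only [List.nil_append]
    rw [List.filter_congr (l := PySem.List.pyRange s (e + 1) 1)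
      (fun w _ => show (!decide (w % 2 = 0)) = decide (w % 2 = 1) by
        by_cases h : w % 2 = 0 <;> simp [h] <;> omega)]
    exact (stride_eq ((e + 1) - s).toNat (e + 1) 1 (Or.inr rfl) s rfl).symm
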